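-- pv_equiv track=rewrite | github.com/samgensburg/adventofcode | 2022/08.py | visible_in_line
-- ===== SOURCE A (Python) =====
-- def visible_in_line(line):
-- 	output = [False for n in line]
-- 	current_left = -1
-- 	current_right = -1
-- 	for i in range(len(line)):
-- 		n = line[i]
-- 		if n > current_left:
-- 			output[i] = True
-- 			current_left = n
-- 	for i in range(len(line) - 1, -1, -1):
-- 		n = line[i]
-- 		if n > current_right:
-- 			output[i] = True
-- 			current_right = n
-- 	return output
-- ===== SOURCE B (Python) =====
-- def visible_in_line(line):
--     # Directly: element i is visible iff it is taller than everything to its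
--     # left or everything to its right (border height -1).
--     return [n > max([-1, *line[:i]]) or n > max([-1, *line[i+1:]])
--             for i, n in enumerate(line)]
-- ===== Notes on version B (the rewrite author's own statement) =====
-- stated objective: simpler
-- what changed: B drops A's two stateful in-place running-max marking scans entirely and instead computes each element's visibility directly from the maxima of its left and right slices in one comprehension (quadratic brute force, much shorter).
import Mathlib
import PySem

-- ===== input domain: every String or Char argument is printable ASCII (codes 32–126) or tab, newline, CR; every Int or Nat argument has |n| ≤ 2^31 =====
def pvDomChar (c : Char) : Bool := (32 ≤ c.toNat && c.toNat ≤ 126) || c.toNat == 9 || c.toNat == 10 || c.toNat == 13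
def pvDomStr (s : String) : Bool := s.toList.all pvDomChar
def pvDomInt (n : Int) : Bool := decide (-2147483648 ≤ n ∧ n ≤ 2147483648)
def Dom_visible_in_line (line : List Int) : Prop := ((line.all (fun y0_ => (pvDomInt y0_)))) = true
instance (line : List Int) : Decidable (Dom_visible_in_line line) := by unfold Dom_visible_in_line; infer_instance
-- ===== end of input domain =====

-- B replaces A's two stateful in-place running-max marking scans with one comprehension
-- computing each element's visibility directly from the maxima of its left/right slices
-- (simpler, quadratic instead of linear).

-- ===== PORT A =====
-- the two Python loops have the identical body, transliterated once:
def pvStepA (line : List Int) (st : List Bool × Int) (i : Int) : List Bool × Int :=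
  let n := PySem.List.pyGetD line i 0
  if n > st.2 then (PySem.List.pySetD st.1 i true, n) else st

def visible_in_line (line : List Int) : List Bool :=
  let output := line.map (fun _ => false)
  let s1 := (PySem.List.pyRange 0 (line.length : Int) 1).foldl (pvStepA line) (output, -1)
  let s2 := (PySem.List.pyRange ((line.length : Int) - 1) (-1) (-1)).foldl (pvStepA line) (s1.1, -1)
  s2.1

-- ===== PORT B =====
-- max([-1, *l]) : nonempty, so max? always returns a value
def pvMaxB (l : List Int) : Int :=
  (PySem.List.max? ((-1) :: l) (fun x => x)).getD (-1)

def visible_in_line_alt (line : List Int) : List Bool :=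
  (PySem.List.enumerate line 0).map (fun p =>
    decide (pvMaxB (PySem.List.slice line none (some p.1)) < p.2) ||
    decide (pvMaxB (PySem.List.slice line (some (p.1 + 1)) none) < p.2))

-- ===== PRECONDITION & SPEC =====
def Spec_visible_in_line (line : List Int) (out : List Bool) : Prop := out = visible_in_line_alt line
instance (line : List Int) (out : List Bool) : Decidable (Spec_visible_in_line line out) := by unfold Spec_visible_in_line; infer_instance

-- ===== CLAIM (what is proved, stated in full; the proofs are below) =====
def Claim_equal_visible_in_line : Prop := ∀ (line : List Int), Dom_visible_in_line line → Spec_visible_in_line line (visible_in_line line)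

-- ===== LEMMAS AND PROOFS =====

-- running maxima: pvPmax xs k = max(-1, xs[0..k)), pvSmax xs k = max(-1, xs[k..])
def pvPmax (xs : List Int) (k : Nat) : Int := (xs.take k).foldl max (-1)
def pvSmax (xs : List Int) (k : Nat) : Int := (xs.drop k).foldl max (-1)
def pvLvis (xs : List Int) (j : Nat) : Bool := decide (pvPmax xs j < xs[j]?.getD 0)
def pvRvis (xs : List Int) (j : Nat) : Bool := decide (pvSmax xs (j + 1) < xs[j]?.getD 0)

theorem foldl_max_comm (l : List Int) : ∀ (m x : Int), l.foldl max (max m x) = max (l.foldl max m) x := by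
  induction l with
  | nil => intro m x; simp
  | cons a l ih =>
    intro m x
    simp only [List.foldl_cons]
    rw [show max (max m x) a = max (max m a) x from by rw [max_right_comm], ih]

theorem pvPmax_succ (xs : List Int) (k : Nat) (hk : k < xs.length) :
    pvPmax xs (k + 1) = max (pvPmax xs k) (xs[k]?.getD 0) := by
  unfold pvPmax
  rw [List.take_add_one, List.foldl_append]
  simp [List.getElem?_eq_getElem hk]

theorem pvSmax_eq (xs : List Int) (k : Nat) (hk : k < xs.length) :
    pvSmax xs k = max (pvSmax xs (k + 1)) (xs[k]?.getD 0) := by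
  unfold pvSmax
  rw [List.drop_eq_getElem_cons hk]
  simp only [List.foldl_cons]
  rw [← foldl_max_comm]
  simp [List.getElem?_eq_getElem hk]

-- ascending loop of A: marks every index ≥ k left-visible, leaves indices < k alone
theorem foldA_asc (xs : List Int) (d : Nat) : ∀ (k : Nat) (out : List Bool),
    out.length = xs.length → k + d = xs.length →
    ((PySem.List.pyRange (k : Int) (xs.length : Int) 1).foldl (pvStepA xs) (out, pvPmax xs k)).1
      = out.mapIdx (fun j b => if j < k then b else b || pvLvis xs j) := by
  induction d with
  | zero =>
    intro k out hlen hk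
    rw [PySem.List.pyRange_one_eq_nil (by omega)]
    simp only [List.foldl_nil]
    apply List.ext_getElem (by simp)
    intro j h1 h2
    simp only [List.getElem_mapIdx]
    have : j < k := by omega
    simp [this]
  | succ d ih =>
    intro k out hlen hk
    have hk' : k < xs.length := by omega
    rw [PySem.List.pyRange_one_cons (by exact_mod_cast hk')]
    simp only [List.foldl_cons]
    have hget : PySem.List.pyGetD xs (k : Int) 0 = xs[k]?.getD 0 := by
      simp [PySem.List.pyGetD]
    have hcast : ((k + 1 : Nat) : Int) = (k : Int) + 1 := by push_cast; ring
    by_cases hc : pvPmax xs k < xs[k]?.getD 0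
    · have hstep : pvStepA xs (out, pvPmax xs k) (k : Int)
          = (out.set k true, xs[k]?.getD 0) := by
        simp [pvStepA, hget, hc, PySem.List.pySetD_natCast]
      rw [hstep]
      have hcur : xs[k]?.getD 0 = pvPmax xs (k + 1) := by
        rw [pvPmax_succ xs k hk']; omega
      have ih' := ih (k + 1) (out.set k true) (by simpa using hlen) (by omega)
      rw [hcast] at ih'
      rw [hcur, ih']
      apply List.ext_getElem (by simp)
      intro j h1 h2
      have hj : j < out.length := by simpa using h2
      simp only [List.getElem_mapIdx, List.getElem_set]
      split_ifs <;> simp_all [pvLvis] <;> omega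
    · have hstep : pvStepA xs (out, pvPmax xs k) (k : Int) = (out, pvPmax xs k) := by
        simp [pvStepA, hget, hc]
      rw [hstep]
      have hcur : pvPmax xs k = pvPmax xs (k + 1) := by
        rw [pvPmax_succ xs k hk']; omega
      have ih' := ih (k + 1) out hlen (by omega)
      rw [hcast] at ih'
      rw [hcur, ih']
      apply List.ext_getElem (by simp)
      intro j h1 h2
      simp only [List.getElem_mapIdx]
      rcases lt_trichotomy j k with h | h | h
      · rw [if_pos h, if_pos (by omega)]
      · subst h
        have hv : pvLvis xs j = false := by simp [pvLvis]; omega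
        rw [if_pos (Nat.lt_succ_self j), if_neg (Nat.lt_irrefl j), hv]
        simp
      · rw [if_neg (by omega), if_neg (by omega)]

-- descending loop of A: ORs right-visibility into every index < k
theorem foldA_desc (xs : List Int) : ∀ (k : Nat) (out : List Bool),
    out.length = xs.length → k ≤ xs.length →
    ((PySem.List.pyRange ((k : Int) - 1) (-1) (-1)).foldl (pvStepA xs) (out, pvSmax xs k)).1
      = out.mapIdx (fun j b => if j < k then b || pvRvis xs j else b) := by
  intro k
  induction k with
  | zero =>
    intro out hlen _
    rw [PySem.List.pyRange_neg_one_eq_nil (by norm_num)]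
    simp only [List.foldl_nil]
    apply List.ext_getElem (by simp)
    intro j h1 h2
    simp [List.getElem_mapIdx]
  | succ k ih =>
    intro out hlen hk
    have hk' : k < xs.length := by omega
    rw [show ((k + 1 : Nat) : Int) - 1 = (k : Int) from by push_cast; ring]
    rw [PySem.List.pyRange_neg_one_cons (by omega)]
    simp only [List.foldl_cons]
    have hget : PySem.List.pyGetD xs (k : Int) 0 = xs[k]?.getD 0 := by
      simp [PySem.List.pyGetD]
    by_cases hc : pvSmax xs (k + 1) < xs[k]?.getD 0
    · have hstep : pvStepA xs (out, pvSmax xs (k + 1)) (k : Int)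
          = (out.set k true, xs[k]?.getD 0) := by
        simp [pvStepA, hget, hc, PySem.List.pySetD_natCast]
      rw [hstep]
      have hcur : xs[k]?.getD 0 = pvSmax xs k := by
        rw [pvSmax_eq xs k hk']; omega
      rw [hcur, ih (out.set k true) (by simpa using hlen) (by omega)]
      apply List.ext_getElem (by simp)
      intro j h1 h2
      have hj : j < out.length := by simpa using h2
      simp only [List.getElem_mapIdx, List.getElem_set]
      split_ifs <;> simp_all [pvRvis] <;> omega
    · have hstep : pvStepA xs (out, pvSmax xs (k + 1)) (k : Int) = (out, pvSmax xs (k + 1)) := by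
        simp [pvStepA, hget, hc]
      rw [hstep]
      have hcur : pvSmax xs (k + 1) = pvSmax xs k := by
        rw [pvSmax_eq xs k hk']; omega
      rw [hcur, ih out hlen (by omega)]
      apply List.ext_getElem (by simp)
      intro j h1 h2
      simp only [List.getElem_mapIdx]
      rcases lt_trichotomy j k with h | h | h
      · rw [if_pos h, if_pos (by omega)]
      · subst h
        have hv : pvRvis xs j = false := by simp [pvRvis]; omega
        rw [if_neg (Nat.lt_irrefl j), if_pos (Nat.lt_succ_self j), hv]
        simp
      · rw [if_neg (by omega), if_neg (by omega)]

theorem visible_in_line_eq_spec (xs : List Int) :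
    visible_in_line xs = (List.range xs.length).map (fun j => pvLvis xs j || pvRvis xs j) := by
  simp only [visible_in_line]
  have h0 : (-1 : Int) = pvPmax xs 0 := rfl
  have h1 := foldA_asc xs xs.length 0 (xs.map (fun _ => false)) (by simp) (by omega)
  simp only [Nat.cast_zero] at h1
  rw [← h0] at h1
  rw [h1]
  have hlen1 : ((xs.map (fun _ => false)).mapIdx
      (fun j b => if j < 0 then b else b || pvLvis xs j)).length = xs.length := by simp
  have h2' : (-1 : Int) = pvSmax xs xs.length := by simp [pvSmax]
  have h2 := foldA_desc xs xs.length _ hlen1 (le_refl _)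
  rw [← h2'] at h2
  rw [h2]
  apply List.ext_getElem (by simp)
  intro j h1' h2''
  have hj : j < xs.length := by simpa using h2''
  simp [List.getElem_mapIdx, hj]

theorem pvMaxB_eq_foldl (l : List Int) : pvMaxB l = l.foldl max (-1) := by
  simp [pvMaxB, PySem.List.max?_id_cons]

theorem visible_in_line_alt_eq_spec (xs : List Int) :
    visible_in_line_alt xs = (List.range xs.length).map (fun j => pvLvis xs j || pvRvis xs j) := by
  simp only [visible_in_line_alt]
  apply List.ext_getElem (by simp [PySem.List.length_enumerate])
  intro j h1 h2
  have hj : j < xs.length := by simpa [PySem.List.length_enumerate] using h1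
  simp only [List.getElem_map, PySem.List.getElem_enumerate, List.getElem_range]
  have hz : (0 : Int) + (j : Int) = (j : Int) := by ring
  rw [hz]
  have hs1 : PySem.List.slice xs none (some (j : Int)) = xs.take j :=
    PySem.List.slice_to_natCast xs j
  have hs2 : PySem.List.slice xs (some ((j : Int) + 1)) none = xs.drop (j + 1) := by
    rw [show ((j : Int) + 1) = ((j + 1 : Nat) : Int) from by push_cast; ring]
    exact PySem.List.slice_from_natCast xs (j + 1)
  rw [hs1, hs2, pvMaxB_eq_foldl, pvMaxB_eq_foldl]
  simp [pvLvis, pvRvis, pvPmax, pvSmax, List.getElem?_eq_getElem hj]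

-- ===== VERDICT (by name: the statement is the Claim_ definition above) =====
theorem visible_in_line_spec : Claim_equal_visible_in_line := by
  intro xs _
  unfold Spec_visible_in_line
  rw [visible_in_line_eq_spec, visible_in_line_alt_eq_spec]
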